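-- pv_equiv track=rewrite | github.com/itsbekas/spotify-stats | src/spotifystats/core/service/import_history.py | get_unique_tracks
-- ===== SOURCE A (Python) =====
-- def get_unique_tracks(history) -> dict:
--     unique = {}
--     for play in history:
--         artist = play["artistName"]
--         track = play["trackName"]
--         if artist not in unique:
--             unique[artist] = {}
--         if track not in unique[artist]:
--             unique[artist][track] = None
--     return unique
-- ===== SOURCE B (Python) =====
-- def get_unique_tracks(history) -> dict:
--     # Group-by-artist strategy: extract the (artist, track) pair stream once,
--     # list artists in first-appearance order, then for each artist scan the
--     # stream for its tracks, deduping in order with dict.fromkeys.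
--     pairs = [(p["artistName"], p["trackName"]) for p in history]
--     artists = []
--     for a, _ in pairs:
--         if a not in artists:
--             artists.append(a)
--     return {a: dict.fromkeys(t for x, t in pairs if x == a) for a in artists}
-- ===== Notes on version B (the rewrite author's own statement) =====
-- stated objective: alternative
-- what changed: A's single build-while-scan loop over a nested dict is replaced by a group-by-artist algorithm: one pass extracts the (artist, track) stream and the first-appearance artist list, then each artist's track list is collected by a separate filtered scan of the stream, deduped with dict.fromkeys.
import Mathlib
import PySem

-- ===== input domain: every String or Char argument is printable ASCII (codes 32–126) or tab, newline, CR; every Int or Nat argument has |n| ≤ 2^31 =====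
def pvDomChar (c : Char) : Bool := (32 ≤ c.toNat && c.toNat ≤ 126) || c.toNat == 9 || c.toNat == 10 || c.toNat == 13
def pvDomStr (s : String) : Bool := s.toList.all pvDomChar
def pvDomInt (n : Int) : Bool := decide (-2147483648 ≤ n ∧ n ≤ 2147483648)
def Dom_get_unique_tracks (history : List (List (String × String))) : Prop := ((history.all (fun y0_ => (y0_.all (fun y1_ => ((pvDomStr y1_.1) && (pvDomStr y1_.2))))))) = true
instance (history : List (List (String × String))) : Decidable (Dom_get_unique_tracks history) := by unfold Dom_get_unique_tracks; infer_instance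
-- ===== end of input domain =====

-- B replaces A's single build-while-scan nested-dict loop by a group-by-artist
-- algorithm: first-appearance artist list, then a filtered scan per artist
-- (objective: alternative; not faster).

-- ===== PORT A =====
-- play["artistName"] is modelled by getD with a dummy default; Pre_ guarantees the key
-- is present (Python raises KeyError otherwise), so the default is never read.
def get_unique_tracks (history : List (List (String × String))) : List (String × List (String × Option String)) :=
  let unique := history.foldl
    (fun (unique : PySem.Dict String (PySem.Dict String (Option String))) play =>
      let artist := (PySem.Dict.mk play).getD "artistName" ""
      let track := (PySem.Dict.mk play).getD "trackName" ""
      let unique := if unique.contains artist then unique else unique.insert artist PySem.Dict.empty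
      if (unique.getD artist PySem.Dict.empty).contains track then unique
      else unique.insert artist ((unique.getD artist PySem.Dict.empty).insert track none))
    PySem.Dict.empty
  unique.items.map (fun kv => (kv.1, kv.2.items))

-- ===== PORT B =====
-- pairs/artists/the dict comprehension ported literally; the artist-dedup loop is the
-- Set.add fold, dict.fromkeys over the filtered track stream is PySem.List.dedup.
def get_unique_tracks_alt (history : List (List (String × String))) : List (String × List (String × Option String)) :=
  let pairs := history.map (fun play =>
      ((PySem.Dict.mk play).getD "artistName" "", (PySem.Dict.mk play).getD "trackName" ""))
  let artists := pairs.foldl (fun acc p => PySem.Set.add acc p.1) PySem.Set.empty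
  artists.map (fun a =>
    (a, (PySem.List.dedup ((pairs.filter (fun pr => pr.1 == a)).map (·.2))).map
          (fun t => (t, (none : Option String)))))

-- ===== PRECONDITION & SPEC =====
-- Pre_ excludes exactly the plays missing an "artistName" or "trackName" key, on which Python A raises KeyError.
def Pre_get_unique_tracks (history : List (List (String × String))) : Prop :=
  (history.all (fun play => (PySem.Dict.mk play).contains "artistName" && (PySem.Dict.mk play).contains "trackName")) = true
instance (history : List (List (String × String))) : Decidable (Pre_get_unique_tracks history) := by unfold Pre_get_unique_tracks; infer_instance

def pvWitness_get_unique_tracks : (List (List (String × String))) :=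
  [[("artistName", "The Knife"), ("trackName", "Heartbeats")],
   [("artistName", "The Knife"), ("trackName", "Pass This On")],
   [("artistName", "The Knife"), ("trackName", "Heartbeats")]]

def Spec_get_unique_tracks (history : List (List (String × String))) (out : List (String × List (String × Option String))) : Prop := out = get_unique_tracks_alt history
instance (history : List (List (String × String))) (out : List (String × List (String × Option String))) : Decidable (Spec_get_unique_tracks history out) := by unfold Spec_get_unique_tracks; infer_instance

-- ===== CLAIM (what is proved, stated in full; the proofs are below) =====
def Claim_equal_get_unique_tracks : Prop := ∀ (history : List (List (String × String))), Dom_get_unique_tracks history → Pre_get_unique_tracks history → Spec_get_unique_tracks history (get_unique_tracks history)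

-- ===== LEMMAS AND PROOFS =====

-- The extraction both ports perform on a play.
def pvPair (play : List (String × String)) : String × String :=
  ((PySem.Dict.mk play).getD "artistName" "", (PySem.Dict.mk play).getD "trackName" "")

-- A's loop body, on the extracted pair.
def pvStepA (u : PySem.Dict String (PySem.Dict String (Option String))) (p : String × String) :
    PySem.Dict String (PySem.Dict String (Option String)) :=
  let u := if u.contains p.1 then u else u.insert p.1 PySem.Dict.empty
  if (u.getD p.1 PySem.Dict.empty).contains p.2 then u
  else u.insert p.1 ((u.getD p.1 PySem.Dict.empty).insert p.2 none)

-- B's per-artist inner dict, as a Dict.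
def pvInner (ps : List (String × String)) (a : String) : PySem.Dict String (Option String) :=
  PySem.Dict.mk ((PySem.List.dedup ((ps.filter (fun pr => pr.1 == a)).map (·.2))).map
    (fun t => (t, (none : Option String))))

theorem pvDedup_append_singleton {α : Type} [BEq α] [LawfulBEq α] (l : List α) (x : α) :
    PySem.List.dedup (l ++ [x]) =
      if x ∈ PySem.List.dedup l then PySem.List.dedup l else PySem.List.dedup l ++ [x] := by
  simp [PySem.Set.ofList_eq_foldl, List.foldl_append, PySem.Set.add, PySem.Set.contains]

theorem pvInner_append_ne (ps : List (String × String)) (p : String × String) (a : String)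
    (h : a ≠ p.1) : pvInner (ps ++ [p]) a = pvInner ps a := by
  have hb : (p.1 == a) = false := beq_eq_false_iff_ne.mpr (Ne.symm h)
  simp [pvInner, List.filter_append, hb]

theorem pvInner_contains (ps : List (String × String)) (a t : String) :
    (pvInner ps a).contains t = true ↔ t ∈ (ps.filter (fun pr => pr.1 == a)).map (·.2) := by
  rw [PySem.Dict.contains_iff_mem_keys]
  simp [pvInner, PySem.Dict.keys]

theorem pvFilter_append_self (ps : List (String × String)) (p : String × String) :
    (ps ++ [p]).filter (fun pr => pr.1 == p.1) = ps.filter (fun pr => pr.1 == p.1) ++ [p] := by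
  simp [List.filter_append]

theorem pvInner_append_self_old (ps : List (String × String)) (p : String × String)
    (ht : p.2 ∈ (ps.filter (fun pr => pr.1 == p.1)).map (·.2)) :
    pvInner (ps ++ [p]) p.1 = pvInner ps p.1 := by
  rw [pvInner, pvFilter_append_self, List.map_append,
    show ([p].map (·.2)) = [p.2] from rfl, pvDedup_append_singleton,
    if_pos (by rwa [PySem.List.mem_dedup])]
  rfl

theorem pvInner_append_self_new (ps : List (String × String)) (p : String × String)
    (ht : p.2 ∉ (ps.filter (fun pr => pr.1 == p.1)).map (·.2)) :
    pvInner (ps ++ [p]) p.1 = (pvInner ps p.1).insert p.2 none := by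
  have hic : (pvInner ps p.1).contains p.2 = false := by
    rw [Bool.eq_false_iff]; intro hcc; exact ht ((pvInner_contains _ _ _).mp hcc)
  apply PySem.Dict.ext
  rw [PySem.Dict.items_insert_of_not_contains _ _ hic]
  rw [pvInner, pvFilter_append_self, List.map_append,
    show ([p].map (·.2)) = [p.2] from rfl, pvDedup_append_singleton,
    if_neg (by rw [PySem.List.mem_dedup]; exact ht), List.map_append]
  rfl

-- The characterisation of A's loop state: keys are first-appearance artists, values are
-- the per-artist inner dicts.
theorem pvSpecA (ps : List (String × String)) :
    (ps.foldl pvStepA PySem.Dict.empty).items =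
      (PySem.List.dedup (ps.map (·.1))).map (fun a => (a, pvInner ps a)) := by
  induction ps using List.reverseRecOn with
  | nil => rfl
  | append_singleton ps p ih =>
    have hkeys : (ps.foldl pvStepA PySem.Dict.empty).keys = PySem.List.dedup (ps.map (·.1)) := by
      simp [PySem.Dict.keys, ih, Function.comp_def]
    have hnd : (ps.foldl pvStepA PySem.Dict.empty).keys.Nodup := by
      rw [hkeys]; exact PySem.List.nodup_dedup _
    have hcont : (ps.foldl pvStepA PySem.Dict.empty).contains p.1 = true ↔ p.1 ∈ ps.map (·.1) := by
      rw [PySem.Dict.contains_iff_mem_keys, hkeys, PySem.List.mem_dedup]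
    have hfirsts : PySem.List.dedup ((ps ++ [p]).map (·.1)) =
        if p.1 ∈ PySem.List.dedup (ps.map (·.1)) then PySem.List.dedup (ps.map (·.1))
        else PySem.List.dedup (ps.map (·.1)) ++ [p.1] := by
      rw [List.map_append]; exact pvDedup_append_singleton _ _
    rw [List.foldl_append, List.foldl_cons, List.foldl_nil]
    by_cases ha : p.1 ∈ ps.map (·.1)
    · -- artist already present
      have hc : (ps.foldl pvStepA PySem.Dict.empty).contains p.1 = true := hcont.mpr ha
      have hmemit : (p.1, pvInner ps p.1) ∈ (ps.foldl pvStepA PySem.Dict.empty).items := by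
        rw [ih]; exact List.mem_map_of_mem (by rwa [PySem.List.mem_dedup])
      have hgetD : (ps.foldl pvStepA PySem.Dict.empty).getD p.1 PySem.Dict.empty = pvInner ps p.1 :=
        PySem.Dict.getD_of_mem_items _ hmemit hnd _
      have hded : PySem.List.dedup ((ps ++ [p]).map (·.1)) = PySem.List.dedup (ps.map (·.1)) := by
        rw [hfirsts, if_pos (by rwa [PySem.List.mem_dedup])]
      by_cases ht : p.2 ∈ (ps.filter (fun pr => pr.1 == p.1)).map (·.2)
      · -- track already present: state unchanged, and every inner dict unchanged
        have hic : (pvInner ps p.1).contains p.2 = true := (pvInner_contains _ _ _).mpr ht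
        have hstep : pvStepA (ps.foldl pvStepA PySem.Dict.empty) p =
            ps.foldl pvStepA PySem.Dict.empty := by
          simp [pvStepA, hc, hgetD, hic]
        rw [hstep, ih, hded]
        refine List.map_congr_left (fun a _ => ?_)
        by_cases hap : a = p.1
        · rw [hap, pvInner_append_self_old _ _ ht]
        · rw [pvInner_append_ne _ _ _ hap]
      · -- new track for an existing artist
        have hic : (pvInner ps p.1).contains p.2 = false := by
          rw [Bool.eq_false_iff]; intro hcc; exact ht ((pvInner_contains _ _ _).mp hcc)
        have hstep : pvStepA (ps.foldl pvStepA PySem.Dict.empty) p =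
            (ps.foldl pvStepA PySem.Dict.empty).insert p.1
              ((pvInner ps p.1).insert p.2 none) := by
          simp [pvStepA, hc, hgetD, hic]
        rw [hstep, PySem.Dict.items_insert_of_contains _ _ hc, ih, hded, List.map_map]
        refine List.map_congr_left (fun a hamem => ?_)
        by_cases hap : a = p.1
        · simp only [Function.comp_def, hap, beq_self_eq_true, if_true]
          rw [pvInner_append_self_new _ _ ht]
        · simp only [Function.comp_def, beq_eq_false_iff_ne.mpr hap, Bool.false_eq_true,
            if_false]
          rw [pvInner_append_ne _ _ _ hap]
    · -- new artist
      have hc : (ps.foldl pvStepA PySem.Dict.empty).contains p.1 = false := by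
        rw [Bool.eq_false_iff]; intro hcc; exact ha (hcont.mp hcc)
      have hstep : pvStepA (ps.foldl pvStepA PySem.Dict.empty) p =
          (ps.foldl pvStepA PySem.Dict.empty).insert p.1 (PySem.Dict.empty.insert p.2 none) := by
        simp [pvStepA, hc, PySem.Dict.getD_insert_self, PySem.Dict.contains_empty,
          PySem.Dict.insert_insert_self]
      have hfps : ps.filter (fun pr => pr.1 == p.1) = [] := by
        refine List.filter_eq_nil_iff.mpr (fun pr hpr hbeq => ?_)
        exact ha (by rw [← (by simpa using hbeq : pr.1 = p.1)]; exact List.mem_map_of_mem hpr)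
      rw [hstep, PySem.Dict.items_insert_of_not_contains _ _ hc, ih, hfirsts,
        if_neg (by rw [PySem.List.mem_dedup]; exact ha), List.map_append]
      congr 1
      · refine List.map_congr_left (fun a hamem => ?_)
        have hap : a ≠ p.1 := fun h => ha (by rw [← h]; rwa [← PySem.List.mem_dedup])
        rw [pvInner_append_ne _ _ _ hap]
      · refine congrArg (fun x => [(p.1, x)]) ?_
        apply PySem.Dict.ext
        rw [PySem.Dict.items_insert_of_not_contains _ _ (PySem.Dict.contains_empty _),
          pvInner, pvFilter_append_self, hfps]
        rfl

-- ===== VERDICT (by name: the statement is the Claim_ definition above) =====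
theorem get_unique_tracks_spec : Claim_equal_get_unique_tracks := by
  intro history _ _
  unfold Spec_get_unique_tracks get_unique_tracks get_unique_tracks_alt
  rw [show (fun (unique : PySem.Dict String (PySem.Dict String (Option String))) play =>
      let artist := (PySem.Dict.mk play).getD "artistName" ""
      let track := (PySem.Dict.mk play).getD "trackName" ""
      let unique := if unique.contains artist then unique else unique.insert artist PySem.Dict.empty
      if (unique.getD artist PySem.Dict.empty).contains track then unique
      else unique.insert artist ((unique.getD artist PySem.Dict.empty).insert track none))
    = (fun u play => pvStepA u (pvPair play)) from rfl]
  rw [show (fun play => ((PySem.Dict.mk play).getD "artistName" "",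
      (PySem.Dict.mk play).getD "trackName" "")) = pvPair from rfl]
  rw [← List.foldl_map]
  have hart : (history.map pvPair).foldl (fun acc p => PySem.Set.add acc p.1) PySem.Set.empty
      = PySem.List.dedup ((history.map pvPair).map (fun x => x.1)) := by
    rw [PySem.List.dedup_eq_ofList, PySem.Set.ofList_eq_foldl, ← List.foldl_map]
    rfl
  show List.map (fun kv => (kv.1, kv.2.items))
      ((history.map pvPair).foldl pvStepA PySem.Dict.empty).items =
    List.map (fun a => (a,
        (PySem.List.dedup (((history.map pvPair).filter (fun pr => pr.1 == a)).map
          (fun x => x.2))).map (fun t => (t, (none : Option String)))))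
      ((history.map pvPair).foldl (fun acc p => PySem.Set.add acc p.1) PySem.Set.empty)
  rw [pvSpecA, List.map_map, hart]
  rfl
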